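-- pv_equiv track=rewrite | github.com/Matthew-J-Walsh/Short-Axiom-Searching | PolishFormUtilities.py | generate_numbered_template
-- ===== SOURCE A (Python) =====
-- def generate_numbered_template(template):
--     """
--     Generates a template with variables as numbers instead of the blanks generated
--     by a template generator function
--
--     Parameter:
--     template: template with blanks
--
--     Returns:
--     numbered template
--     """
--     i = 0
--     numbered_template = ""
--     for elem in template:
--         if elem=="_":
--             numbered_template += str(i)
--             i += 1
--         else:
--             numbered_template += elem
--     return numbered_template
-- ===== SOURCE B (Python) =====
-- def generate_numbered_template(template):
--     parts = template.split('_')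
--     out = [parts[0]]
--     for i, seg in enumerate(parts[1:]):
--         out.append(str(i))
--         out.append(seg)
--     return ''.join(out)
-- ===== Notes on version B (the rewrite author's own statement) =====
-- stated objective: faster
-- what changed: Replaces the per-character scan with counter and repeated string concatenation by one split on the blank character followed by joining the segments interleaved with enumerate indices.
import Mathlib
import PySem

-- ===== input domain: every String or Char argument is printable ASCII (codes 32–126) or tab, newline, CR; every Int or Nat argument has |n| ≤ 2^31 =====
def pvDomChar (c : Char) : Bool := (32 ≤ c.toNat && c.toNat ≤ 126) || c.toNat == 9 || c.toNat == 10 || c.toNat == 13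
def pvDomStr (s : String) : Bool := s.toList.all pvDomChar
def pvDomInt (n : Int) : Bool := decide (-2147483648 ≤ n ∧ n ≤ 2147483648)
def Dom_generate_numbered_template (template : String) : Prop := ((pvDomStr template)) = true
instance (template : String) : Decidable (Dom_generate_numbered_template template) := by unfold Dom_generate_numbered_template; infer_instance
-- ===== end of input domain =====

-- B replaces A's per-character scan with a split('_') plus an enumerate-and-join interleave (simpler decomposition).

-- ===== PORT A =====
def generate_numbered_template (template : String) : String :=
  let st := template.toList.foldl
    (fun (st : Int × List Char) elem =>
      if elem == '_' then (st.1 + 1, st.2 ++ PySem.Int.toChars st.1)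
      else (st.1, st.2 ++ [elem]))
    (0, [])
  String.mk st.2

-- ===== PORT B =====
def generate_numbered_template_alt (template : String) : String :=
  let parts := PySem.Chars.splitOn template.toList ['_']
  let head := (PySem.List.pyGet? parts 0).getD []
  let out := (PySem.List.enumerate (parts.drop 1) 0).foldl
      (fun acc p => acc ++ [PySem.Int.toChars p.1, p.2]) [head]
  String.mk (PySem.Chars.join [] out)

-- ===== PRECONDITION & SPEC =====
def Spec_generate_numbered_template (template : String) (out : String) : Prop := out = generate_numbered_template_alt template
instance (template : String) (out : String) : Decidable (Spec_generate_numbered_template template out) := by unfold Spec_generate_numbered_template; infer_instance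

-- ===== CLAIM (what is proved, stated in full; the proofs are below) =====
def Claim_equal_generate_numbered_template : Prop := ∀ (template : String), Dom_generate_numbered_template template → Spec_generate_numbered_template template (generate_numbered_template template)

-- ===== LEMMAS AND PROOFS =====

-- Reference single-character split on '_' (proof-only helper).
def mySplit : List Char → List Char → List (List Char)
  | [], cur => [cur.reverse]
  | c :: cs, cur => if c = '_' then cur.reverse :: mySplit cs [] else mySplit cs (c :: cur)

theorem go_eq (cs : List Char) : ∀ (fuel : Nat) (cur : List Char) (acc : List (List Char)),
    cs.length < fuel →
    PySem.Chars.splitOn.go ['_'] fuel cs cur acc = acc.reverse ++ mySplit cs cur := by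
  induction cs with
  | nil =>
    intro fuel cur acc h
    cases fuel with
    | zero => omega
    | succ n => simp [PySem.Chars.splitOn.go, mySplit]
  | cons c cs ih =>
    intro fuel cur acc h
    cases fuel with
    | zero => simp at h
    | succ n =>
      simp only [PySem.Chars.splitOn.go]
      by_cases hc : c = '_'
      · subst hc
        simp only [List.isPrefixOf, Bool.and_true, beq_self_eq_true,
          if_pos]
        simp only [List.length_cons, List.length_nil, List.drop_succ_cons, List.drop_zero] at *
        rw [ih n [] ((cur.reverse) :: acc) (by omega)]
        simp [mySplit]
      · have : List.isPrefixOf ['_'] (c :: cs) = false := by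
          simp [List.isPrefixOf]
          exact fun hh => hc hh.symm
        rw [this]
        simp only [Bool.false_eq_true, if_false]
        simp only [List.length_cons] at h
        rw [ih n (c :: cur) acc (by omega)]
        simp [mySplit, hc]

theorem splitOn_eq (cs : List Char) : PySem.Chars.splitOn cs ['_'] = mySplit cs [] := by
  unfold PySem.Chars.splitOn
  rw [go_eq cs (cs.length + 1) [] [] (by omega)]
  simp

theorem mySplit_cur (cs : List Char) : ∀ cur,
    mySplit cs cur = (mySplit cs []).modifyHead (cur.reverse ++ ·) := by
  induction cs with
  | nil => intro cur; simp [mySplit]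
  | cons c cs ih =>
    intro cur
    by_cases hc : c = '_'
    · subst hc; simp [mySplit]
    · simp only [mySplit, if_neg hc]
      rw [ih (c :: cur), ih [c]]
      cases mySplit cs [] with
      | nil => simp
      | cons h t => simp

theorem mySplit_ne_nil (cs : List Char) (cur : List Char) : mySplit cs cur ≠ [] := by
  induction cs generalizing cur with
  | nil => simp [mySplit]
  | cons c cs ih =>
    by_cases hc : c = '_'
    · subst hc; simp [mySplit]
    · simpa [mySplit, hc] using ih (c :: cur)

theorem flatten_intersperse_nil (L : List (List Char)) :
    (List.intersperse ([] : List Char) L).flatten = L.flatten := by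
  induction L with
  | nil => simp
  | cons a t ih => cases t <;> simp_all [List.intersperse]

-- numbered interleave: str(i) ++ p₀ ++ str(i+1) ++ p₁ ++ …
def bNum : List (List Char) → Int → List Char
  | [], _ => []
  | p :: ps, i => PySem.Int.toChars i ++ p ++ bNum ps (i + 1)

theorem joinFold (rest : List (List Char)) : ∀ (i : Int) (L : List (List Char)),
    PySem.Chars.join [] ((PySem.List.enumerate rest i).foldl
        (fun acc p => acc ++ [PySem.Int.toChars p.1, p.2]) L)
      = PySem.Chars.join [] L ++ bNum rest i := by
  induction rest with
  | nil => intro i L; simp [PySem.List.enumerate_nil, bNum]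
  | cons x xs ih =>
    intro i L
    rw [PySem.List.enumerate_cons]
    simp only [List.foldl_cons]
    rw [ih (i + 1) (L ++ [PySem.Int.toChars i, x])]
    simp [PySem.Chars.join, bNum, List.intercalate, flatten_intersperse_nil]

theorem mainLemma (cs : List Char) : ∀ (i : Int) (acc : List Char),
    (cs.foldl
      (fun (st : Int × List Char) elem =>
        if elem == '_' then (st.1 + 1, st.2 ++ PySem.Int.toChars st.1)
        else (st.1, st.2 ++ [elem]))
      (i, acc)).2
    = acc ++ (mySplit cs []).headI ++ bNum (mySplit cs []).tail i := by
  induction cs with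
  | nil => intro i acc; simp [mySplit, bNum]
  | cons c cs ih =>
    intro i acc
    by_cases hc : c = '_'
    · subst hc
      simp only [List.foldl_cons, beq_self_eq_true, if_pos]
      rw [ih (i + 1) (acc ++ PySem.Int.toChars i)]
      obtain ⟨h, t, ht⟩ : ∃ h t, mySplit cs [] = h :: t := by
        cases hms : mySplit cs [] with
        | nil => exact absurd hms (mySplit_ne_nil cs [])
        | cons h t => exact ⟨h, t, rfl⟩
      simp [mySplit, ht, bNum]
    · have hbeq : (c == '_') = false := by simpa using hc
      simp only [List.foldl_cons, hbeq, Bool.false_eq_true, if_false]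
      rw [ih i (acc ++ [c])]
      have : mySplit (c :: cs) [] = (mySplit cs []).modifyHead ([c] ++ ·) := by
        simp only [mySplit, if_neg hc]
        simpa using mySplit_cur cs [c]
      rw [this]
      obtain ⟨h, t, ht⟩ : ∃ h t, mySplit cs [] = h :: t := by
        cases hms : mySplit cs [] with
        | nil => exact absurd hms (mySplit_ne_nil cs [])
        | cons h t => exact ⟨h, t, rfl⟩
      simp [ht]

-- ===== VERDICT (by name: the statement is the Claim_ definition above) =====
theorem generate_numbered_template_spec : Claim_equal_generate_numbered_template := by
  intro template _
  unfold Spec_generate_numbered_template generate_numbered_template generate_numbered_template_alt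
  simp only []
  rw [splitOn_eq]
  obtain ⟨h, t, ht⟩ : ∃ h t, mySplit template.toList [] = h :: t := by
    cases hms : mySplit template.toList [] with
    | nil => exact absurd hms (mySplit_ne_nil template.toList [])
    | cons h t => exact ⟨h, t, rfl⟩
  rw [ht]
  rw [mainLemma template.toList 0 []]
  rw [ht]
  simp only [List.headI, List.tail, List.drop_one, List.tail_cons]
  rw [joinFold t 0 [(PySem.List.pyGet? (h :: t) 0).getD []]]
  simp [PySem.List.pyGet?, PySem.List.pyIdx?, PySem.Chars.join, List.intercalate]
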